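-- pv_equiv track=rewrite | github.com/DenisGazizov/algo | YP_6/62G_censuric_thing.py | func
-- ===== SOURCE A (Python) =====
-- def func(n, c, array):
--     prefix_b_pos = [0] * (n+1)
--     count_b = 0
--     for i in range(1, n+1):
--         if array[i-1] == 'b':
--             count_b += 1
--         prefix_b_pos[i] = count_b
--     left = result = pairs = 0
--     for right in range(n):
--         b_last = prefix_b_pos[n]
--         if array[right] == 'a':
--             pairs += b_last - prefix_b_pos[right]
--         while pairs > c and left <= right:
--             if array[left] == 'a':
--                 pairs -= b_last - prefix_b_pos[left]
--             left += 1
--         result = max(result, right - left + 1)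
--
--     return result
-- ===== SOURCE B (Python) =====
-- def func(n, c, array):
--     # prefix counts of 'b' and per-position weights, then one prefix-sum array S;
--     # for each right end, binary-search the smallest admissible left in S.
--     count_b = 0
--     prefix_b = [0] * (n + 1)
--     for i in range(1, n + 1):
--         if array[i - 1] == 'b':
--             count_b += 1
--         prefix_b[i] = count_b
--     total_b = count_b
--     S = [0] * (n + 1)
--     for i in range(n):
--         w = total_b - prefix_b[i] if array[i] == 'a' else 0
--         S[i + 1] = S[i] + w
--     result = 0
--     for r in range(n):
--         target = S[r + 1] - c
--         lo, hi = 0, r + 1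
--         while lo < hi:
--             mid = (lo + hi) // 2
--             if S[mid] >= target:
--                 hi = mid
--             else:
--                 lo = mid + 1
--         result = max(result, r + 1 - lo)
--     return result
-- ===== Notes on version B (the rewrite author's own statement) =====
-- stated objective: alternative
-- what changed: Replaces A's amortised two-pointer left sweep (inner while loop shrinking the window) by an explicit weight prefix-sum array S and, for each right end, an independent binary search on the nondecreasing S for the smallest admissible left boundary.
import Mathlib
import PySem

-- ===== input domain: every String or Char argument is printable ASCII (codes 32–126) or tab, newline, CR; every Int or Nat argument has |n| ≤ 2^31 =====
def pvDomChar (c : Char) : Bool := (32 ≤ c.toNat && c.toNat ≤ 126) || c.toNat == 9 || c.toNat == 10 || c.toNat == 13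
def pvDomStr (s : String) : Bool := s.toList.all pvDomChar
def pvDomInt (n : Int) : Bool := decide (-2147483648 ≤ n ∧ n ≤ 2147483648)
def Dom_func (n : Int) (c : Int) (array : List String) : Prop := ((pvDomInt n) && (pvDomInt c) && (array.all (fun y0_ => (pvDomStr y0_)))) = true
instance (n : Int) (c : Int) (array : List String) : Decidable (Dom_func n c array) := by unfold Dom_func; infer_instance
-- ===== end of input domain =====

-- B replaces A's amortised two-pointer left sweep by an independent binary search on the
-- (nondecreasing) weight prefix-sum array for each right end; equivalence of RETURN values.

-- ===== PORT A =====
-- first loop of A: build prefix_b_pos and count_b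
def stepPfxA (array : List String) (st : List Int × Int) (i : Int) : List Int × Int :=
  let count_b := if PySem.List.pyGetD array (i - 1) "" == "b" then st.2 + 1 else st.2
  (PySem.List.pySetD st.1 i count_b, count_b)

-- A's inner while loop
def shrinkA (array : List String) (pfx : List Int) (c b_last right : Int)
    (left pairs : Int) : Int × Int :=
  if h : pairs > c ∧ left ≤ right then
    let pairs' := if PySem.List.pyGetD array left "" == "a"
      then pairs - (b_last - PySem.List.pyGetD pfx left 0) else pairs
    shrinkA array pfx c b_last right (left + 1) pairs'
  else (left, pairs)
termination_by (right + 1 - left).toNat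
decreasing_by omega

-- A's main loop body (state = (left, result, pairs))
def stepA (array : List String) (pfx : List Int) (c n : Int)
    (st : Int × Int × Int) (right : Int) : Int × Int × Int :=
  let b_last := PySem.List.pyGetD pfx n 0
  let pairs := if PySem.List.pyGetD array right "" == "a"
    then st.2.2 + (b_last - PySem.List.pyGetD pfx right 0) else st.2.2
  let lp := shrinkA array pfx c b_last right st.1 pairs
  (lp.1, max st.2.1 (right - lp.1 + 1), lp.2)

def func (n : Int) (c : Int) (array : List String) : Int :=
  let st1 := (PySem.List.pyRange 1 (n + 1) 1).foldl (stepPfxA array)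
      (List.replicate (n + 1).toNat 0, 0)
  let pfx := st1.1
  let st2 := (PySem.List.pyRange 0 n 1).foldl (stepA array pfx c n) (0, 0, 0)
  st2.2.1

-- ===== PORT B =====
-- (Source B's first loop is textually identical to A's, so its port reuses stepPfxA)
-- second loop of B: the weight prefix-sum array S
def stepSB (array : List String) (prefix_b : List Int) (total_b : Int)
    (S : List Int) (i : Int) : List Int :=
  let w := if PySem.List.pyGetD array i "" == "a"
    then total_b - PySem.List.pyGetD prefix_b i 0 else 0
  PySem.List.pySetD S (i + 1) (PySem.List.pyGetD S i 0 + w)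

-- B's hand-written binary search (bisect_left on S within [lo, hi))
def bsearchB (S : List Int) (target lo hi : Int) : Int :=
  if h : lo < hi then
    let mid := PySem.Int.floordiv (lo + hi) 2
    if PySem.List.pyGetD S mid 0 ≥ target then bsearchB S target lo mid
    else bsearchB S target (mid + 1) hi
  else lo
termination_by (hi - lo).toNat
decreasing_by
  · have h1 := (PySem.Int.le_floordiv_iff_mul_le (a := lo + hi) (b := 2) (q := lo) (by omega)).2 (by omega)
    have h2 := (PySem.Int.floordiv_lt_iff_lt_mul (a := lo + hi) (b := 2) (q := hi) (by omega)).2 (by omega)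
    omega
  · have h1 := (PySem.Int.le_floordiv_iff_mul_le (a := lo + hi) (b := 2) (q := lo) (by omega)).2 (by omega)
    omega

-- B's main loop body
def stepB (S : List Int) (c : Int) (result : Int) (r : Int) : Int :=
  let target := PySem.List.pyGetD S (r + 1) 0 - c
  let lo := bsearchB S target 0 (r + 1)
  max result (r + 1 - lo)

def func_alt (n : Int) (c : Int) (array : List String) : Int :=
  let st1 := (PySem.List.pyRange 1 (n + 1) 1).foldl (stepPfxA array)
      (List.replicate (n + 1).toNat 0, 0)
  let prefix_b := st1.1
  let total_b := st1.2
  let S := (PySem.List.pyRange 0 n 1).foldl (stepSB array prefix_b total_b)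
      (List.replicate (n + 1).toNat 0)
  (PySem.List.pyRange 0 n 1).foldl (stepB S c) 0

-- ===== PRECONDITION & SPEC =====
-- Pre: A raises IndexError (array[i-1] in the prefix loop) iff n exceeds len(array);
-- for n ≤ len(array) (including negative n) A returns normally.
def Pre_func (n : Int) (c : Int) (array : List String) : Prop := n ≤ (array.length : Int)
instance (n : Int) (c : Int) (array : List String) : Decidable (Pre_func n c array) := by
  unfold Pre_func; infer_instance
def pvWitness_func : Int × Int × List String := (4, 1, ["a", "b", "a", "b"])
def Spec_func (n : Int) (c : Int) (array : List String) (out : Int) : Prop := out = func_alt n c array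
instance (n : Int) (c : Int) (array : List String) (out : Int) : Decidable (Spec_func n c array out) := by unfold Spec_func; infer_instance

-- ===== CLAIM (what is proved, stated in full; the proofs are below) =====
def Claim_equal_func : Prop := ∀ (n : Int) (c : Int) (array : List String), Dom_func n c array → Pre_func n c array → Spec_func n c array (func n c array)

-- ===== LEMMAS AND PROOFS =====

-- number of "b" among the first k entries
def cntB (array : List String) (k : Nat) : Int := ((array.take k).countP (fun s => s == "b") : Int)

-- weight of position i (t = total number of "b" among the first N entries)
def wtF (array : List String) (t : Int) (i : Nat) : Int :=
  if array.getD i "" == "a" then t - cntB array i else 0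

-- prefix sums of the weights
def ssum (array : List String) (t : Int) (k : Nat) : Int := ∑ i ∈ Finset.range k, wtF array t i

theorem cntB_zero (array : List String) : cntB array 0 = 0 := by simp [cntB]

theorem cntB_succ (array : List String) (m : Nat) (h : m < array.length) :
    cntB array (m + 1) = cntB array m + (if array.getD m "" == "b" then 1 else 0) := by
  have h1 : array.take (m + 1) = array.take m ++ [array[m]] := by
    rw [List.take_add_one, List.getElem?_eq_getElem h]; rfl
  have h2 : array.getD m "" = array[m] := by
    rw [List.getD_eq_getElem?_getD, List.getElem?_eq_getElem h]; rfl
  simp only [cntB, h1, h2, List.countP_append, List.countP_cons, List.countP_nil]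
  split <;> simp

theorem cntB_mono (array : List String) {j k : Nat} (h : j ≤ k) :
    cntB array j ≤ cntB array k := by
  have h1 : array.take j = (array.take k).take j := by
    rw [List.take_take, Nat.min_eq_left h]
  have h2 := (List.take_sublist j (array.take k)).countP_le (p := fun s => s == "b")
  simp only [cntB]
  rw [h1]
  exact_mod_cast h2

theorem ssum_zero (array : List String) (t : Int) : ssum array t 0 = 0 := by simp [ssum]

theorem ssum_succ (array : List String) (t : Int) (k : Nat) :
    ssum array t (k + 1) = ssum array t k + wtF array t k := by
  simp [ssum, Finset.sum_range_succ]

theorem wtF_nonneg (array : List String) (t : Int) (i : Nat) (h : cntB array i ≤ t) :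
    0 ≤ wtF array t i := by
  simp only [wtF]; split <;> omega

theorem ssum_mono (array : List String) (t : Int) {j k : Nat} (hjk : j ≤ k)
    (ht : ∀ i : Nat, i < k → cntB array i ≤ t) :
    ssum array t j ≤ ssum array t k := by
  induction k with
  | zero =>
    have : j = 0 := by omega
    subst this; exact le_refl _
  | succ k ih =>
    rcases Nat.lt_or_ge j (k + 1) with h | h
    · have h1 : ssum array t j ≤ ssum array t k :=
        ih (by omega) (fun i hi => ht i (by omega))
      have h2 := wtF_nonneg array t k (ht k (by omega))
      rw [ssum_succ]; omega
    · have : j = k + 1 := by omega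
      subst this; exact le_refl _

-- the first loop builds exactly the prefix-count table
theorem getD_replicate_zero (N k : Nat) : (List.replicate N (0 : Int)).getD k 0 = 0 := by
  rw [List.getD_eq_getElem?_getD, List.getElem?_replicate]
  split <;> rfl

theorem pfxA_char (array : List String) (N : Nat) (hlen : N ≤ array.length) :
    ∀ m : Nat, m ≤ N →
    ((PySem.List.pyRange 1 ((m : Int) + 1) 1).foldl (stepPfxA array)
        (List.replicate (N + 1) 0, 0)).1.length = N + 1 ∧
    ((PySem.List.pyRange 1 ((m : Int) + 1) 1).foldl (stepPfxA array)
        (List.replicate (N + 1) 0, 0)).2 = cntB array m ∧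
    (∀ k : Nat, k ≤ N →
      PySem.List.pyGetD ((PySem.List.pyRange 1 ((m : Int) + 1) 1).foldl (stepPfxA array)
        (List.replicate (N + 1) 0, 0)).1 (k : Int) 0 = if k ≤ m then cntB array k else 0) := by
  intro m
  induction m with
  | zero =>
    intro _
    rw [PySem.List.pyRange_one_eq_nil (by omega)]
    refine ⟨by simp, by simp [cntB_zero], ?_⟩
    intro k hk
    simp only [List.foldl_nil, PySem.List.pyGetD_natCast, getD_replicate_zero]
    split
    · next h => interval_cases k <;> simp [cntB_zero]
    · rfl
  | succ m ih =>
    intro hm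
    obtain ⟨ihlen, ihcnt, ihget⟩ := ih (by omega)
    have hsplit : PySem.List.pyRange 1 ((↑(m + 1) : Int) + 1) 1
        = PySem.List.pyRange 1 ((m : Int) + 1) 1 ++ [(m : Int) + 1] := by
      have : ((↑(m + 1) : Int) + 1) = ((m : Int) + 1) + 1 := by push_cast; ring
      rw [this, PySem.List.pyRange_one_succ_right (by omega)]
    rw [hsplit, List.foldl_append]
    set st := (PySem.List.pyRange 1 ((m : Int) + 1) 1).foldl (stepPfxA array)
        (List.replicate (N + 1) 0, 0) with hst
    have hidx : ((m : Int) + 1) - 1 = (m : Int) := by ring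
    have hmlen : m < array.length := by omega
    have hcnt' : (if PySem.List.pyGetD array ((m : Int) + 1 - 1) "" == "b"
        then st.2 + 1 else st.2) = cntB array (m + 1) := by
      rw [hidx, PySem.List.pyGetD_natCast, ihcnt, cntB_succ array m hmlen]
      split <;> simp_all
    have hcast : ((m : Int) + 1) = ((m + 1 : Nat) : Int) := by push_cast; ring
    have hstep : stepPfxA array st ((m : Int) + 1)
        = (PySem.List.pySetD st.1 ((m : Int) + 1) (cntB array (m + 1)), cntB array (m + 1)) := by
      simp only [stepPfxA, hcnt']
    simp only [List.foldl_cons, List.foldl_nil, hstep]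
    refine ⟨?_, trivial, ?_⟩
    · rw [hcast, PySem.List.pySetD_natCast, List.length_set]; exact ihlen
    · intro k hk
      rw [hcast, PySem.List.pyGetD_pySetD_natCast st.1 (m + 1) k (cntB array (m + 1)) 0 (by omega)]
      split
      · next h => simp [h]
      · next h =>
        rw [ihget k hk]
        by_cases hkm : k ≤ m
        · rw [if_pos hkm, if_pos (by omega)]
        · rw [if_neg hkm, if_neg (by omega)]

-- B's second loop builds exactly the weight prefix-sum table
theorem SB_char (array : List String) (pfx : List Int) (N : Nat) (hlen : N ≤ array.length)
    (t : Int)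
    (hpfx : ∀ k : Nat, k ≤ N → PySem.List.pyGetD pfx (k : Int) 0 = cntB array k) :
    ∀ m : Nat, m ≤ N →
    ((PySem.List.pyRange 0 (m : Int) 1).foldl (stepSB array pfx t)
        (List.replicate (N + 1) 0)).length = N + 1 ∧
    (∀ k : Nat, k ≤ N →
      PySem.List.pyGetD ((PySem.List.pyRange 0 (m : Int) 1).foldl (stepSB array pfx t)
        (List.replicate (N + 1) 0)) (k : Int) 0 = if k ≤ m then ssum array t k else 0) := by
  intro m
  induction m with
  | zero =>
    intro _
    rw [PySem.List.pyRange_one_eq_nil (by omega)]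
    refine ⟨by simp, ?_⟩
    intro k hk
    simp only [List.foldl_nil, PySem.List.pyGetD_natCast, getD_replicate_zero]
    split
    · next h => interval_cases k <;> simp [ssum_zero]
    · rfl
  | succ m ih =>
    intro hm
    obtain ⟨ihlen, ihget⟩ := ih (by omega)
    have hsplit : PySem.List.pyRange 0 ((↑(m + 1) : Int)) 1
        = PySem.List.pyRange 0 ((m : Int)) 1 ++ [(m : Int)] := by
      have : ((↑(m + 1) : Int)) = ((m : Int)) + 1 := by push_cast; ring
      rw [this, PySem.List.pyRange_one_succ_right (by omega)]
    rw [hsplit, List.foldl_append]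
    set S := (PySem.List.pyRange 0 ((m : Int)) 1).foldl (stepSB array pfx t)
        (List.replicate (N + 1) 0) with hS
    have hw : (if PySem.List.pyGetD array (m : Int) "" == "a"
        then t - PySem.List.pyGetD pfx (m : Int) 0 else 0) = wtF array t m := by
      rw [PySem.List.pyGetD_natCast, hpfx m (by omega), wtF]
    have hread : PySem.List.pyGetD S (m : Int) 0 = ssum array t m := by
      rw [ihget m (by omega), if_pos (le_refl m)]
    have hcast : ((m : Int) + 1) = ((m + 1 : Nat) : Int) := by push_cast; ring
    have hstep : stepSB array pfx t S (m : Int)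
        = PySem.List.pySetD S ((m : Int) + 1) (ssum array t (m + 1)) := by
      simp only [stepSB, hw, hread, ssum_succ]
    simp only [List.foldl_cons, List.foldl_nil, hstep]
    refine ⟨?_, ?_⟩
    · rw [hcast, PySem.List.pySetD_natCast, List.length_set]; exact ihlen
    · intro k hk
      rw [hcast, PySem.List.pyGetD_pySetD_natCast S (m + 1) k (ssum array t (m + 1)) 0 (by omega)]
      split
      · next h => simp [h]
      · next h =>
        rw [ihget k hk]
        by_cases hkm : k ≤ m
        · rw [if_pos hkm, if_pos (by omega)]
        · rw [if_neg hkm, if_neg (by omega)]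

-- the hand-written binary search is bisect_left on a monotone table
theorem bsearchB_spec (S : List Int) (t bnd : Int)
    (hmono : ∀ i j : Int, 0 ≤ i → i ≤ j → j ≤ bnd →
      PySem.List.pyGetD S i 0 ≤ PySem.List.pyGetD S j 0) :
    ∀ (fuel : Nat) (lo hi : Int), (hi - lo).toNat ≤ fuel → 0 ≤ lo → lo ≤ hi → hi ≤ bnd →
    (∀ i : Int, 0 ≤ i → i < lo → PySem.List.pyGetD S i 0 < t) →
    (∀ i : Int, hi ≤ i → i < bnd → t ≤ PySem.List.pyGetD S i 0) →
    0 ≤ bsearchB S t lo hi ∧ bsearchB S t lo hi ≤ bnd ∧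
    (∀ i : Int, 0 ≤ i → i < bsearchB S t lo hi → PySem.List.pyGetD S i 0 < t) ∧
    (bsearchB S t lo hi < bnd → t ≤ PySem.List.pyGetD S (bsearchB S t lo hi) 0) := by
  intro fuel
  induction fuel with
  | zero =>
    intro lo hi hfuel h0 hlohi hhib hbelow habove
    have hlo : lo = hi := by omega
    rw [bsearchB, dif_neg (by omega)]
    exact ⟨h0, by omega, hbelow, fun h => habove lo (by omega) h⟩
  | succ fuel ihf =>
    intro lo hi hfuel h0 hlohi hhib hbelow habove
    rw [bsearchB]
    by_cases hlt : lo < hi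
    · rw [dif_pos hlt]
      have hmid1 : lo ≤ PySem.Int.floordiv (lo + hi) 2 :=
        (PySem.Int.le_floordiv_iff_mul_le (by omega)).2 (by omega)
      have hmid2 : PySem.Int.floordiv (lo + hi) 2 < hi :=
        (PySem.Int.floordiv_lt_iff_lt_mul (by omega)).2 (by omega)
      set mid := PySem.Int.floordiv (lo + hi) 2 with hmid
      by_cases hcmp : PySem.List.pyGetD S mid 0 ≥ t
      · rw [if_pos hcmp]
        exact ihf lo mid (by omega) h0 (by omega) (by omega) hbelow
          (fun i hi1 hi2 => le_trans hcmp (hmono mid i (by omega) hi1 (by omega)))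
      · rw [if_neg hcmp]
        refine ihf (mid + 1) hi (by omega) (by omega) (by omega) hhib ?_ habove
        intro i hi1 hi2
        exact lt_of_le_of_lt (hmono i mid hi1 (by omega) (by omega)) (by omega)
    · rw [dif_neg hlt]
      exact ⟨h0, by omega, hbelow, fun h => habove lo (by omega) h⟩

-- A's inner while loop advances left to the first admissible position
theorem shrinkA_spec (array : List String) (pfx : List Int) (N : Nat)
    (hlen : N ≤ array.length) (t c : Int)
    (hpfx : ∀ k : Nat, k ≤ N → PySem.List.pyGetD pfx (k : Int) 0 = cntB array k)
    (m : Nat) (hm : m < N) :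
    ∀ (fuel l0 : Nat), m + 1 - l0 ≤ fuel → l0 ≤ m + 1 →
    ∃ L : Nat,
      shrinkA array pfx c t (m : Int) (l0 : Int) (ssum array t (m + 1) - ssum array t l0)
        = ((L : Int), ssum array t (m + 1) - ssum array t L) ∧
      l0 ≤ L ∧ L ≤ m + 1 ∧
      (∀ i : Nat, l0 ≤ i → i < L → ssum array t i < ssum array t (m + 1) - c) ∧
      (L < m + 1 → ssum array t (m + 1) - c ≤ ssum array t L) := by
  intro fuel
  induction fuel with
  | zero =>
    intro l0 hfuel hl0
    have : l0 = m + 1 := by omega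
    subst this
    refine ⟨m + 1, ?_, le_refl _, le_refl _, by omega, by omega⟩
    rw [shrinkA, dif_neg (by push_cast; omega)]
  | succ fuel ihf =>
    intro l0 hfuel hl0
    rw [shrinkA]
    by_cases hcond : ssum array t (m + 1) - ssum array t l0 > c ∧ (l0 : Int) ≤ (m : Int)
    · rw [dif_pos hcond]
      have hl0m : l0 ≤ m := by exact_mod_cast hcond.2
      have hstep : (if PySem.List.pyGetD array (l0 : Int) "" == "a"
          then ssum array t (m + 1) - ssum array t l0 - (t - PySem.List.pyGetD pfx (l0 : Int) 0)
          else ssum array t (m + 1) - ssum array t l0)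
          = ssum array t (m + 1) - ssum array t (l0 + 1) := by
        have hsucc : ssum array t (l0 + 1) = ssum array t l0 + wtF array t l0 :=
          ssum_succ array t l0
        rw [PySem.List.pyGetD_natCast, hpfx l0 (by omega), hsucc, wtF]
        split <;> ring
      rw [hstep]
      have hcast : ((l0 : Int) + 1) = ((l0 + 1 : Nat) : Int) := by push_cast; ring
      rw [hcast]
      obtain ⟨L, heq, hLl, hLm, hbetween, hstop⟩ := ihf (l0 + 1) (by omega) (by omega)
      refine ⟨L, heq, by omega, hLm, ?_, hstop⟩
      intro i hi1 hi2
      rcases Nat.lt_or_ge i (l0 + 1) with h | h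
      · have : i = l0 := by omega
        subst this; omega
      · exact hbetween i h hi2
    · rw [dif_neg hcond]
      refine ⟨l0, rfl, le_refl _, hl0, by omega, ?_⟩
      intro h
      have : ¬ ((l0 : Int) ≤ (m : Int)) → False := by
        intro hc; exact hc (by exact_mod_cast Nat.le_of_lt_succ h)
      omega

-- a "stopping point" of the scan is unique
theorem stop_unique (f : Nat → Int) (t : Int) (b x y : Nat)
    (hx1 : x ≤ b) (hx2 : ∀ i, i < x → f i < t) (hx3 : x < b → t ≤ f x)
    (hy1 : y ≤ b) (hy2 : ∀ i, i < y → f i < t) (hy3 : y < b → t ≤ f y) : x = y := by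
  rcases lt_trichotomy x y with h | h | h
  · have h1 := hy2 x h
    have h2 := hx3 (lt_of_lt_of_le h hy1)
    omega
  · exact h
  · have h1 := hx2 y h
    have h2 := hy3 (lt_of_lt_of_le h hx1)
    omega

-- the coupled invariant of A's and B's main loops
theorem main_inv (array : List String) (pfx S : List Int) (N : Nat) (c : Int)
    (hlen : N ≤ array.length) (t : Int) (ht : t = cntB array N)
    (hpfx : ∀ k : Nat, k ≤ N → PySem.List.pyGetD pfx (k : Int) 0 = cntB array k)
    (hS : ∀ k : Nat, k ≤ N → PySem.List.pyGetD S (k : Int) 0 = ssum array t k) :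
    ∀ m : Nat, m ≤ N →
    ∃ left : Nat,
      (PySem.List.pyRange 0 (m : Int) 1).foldl (stepA array pfx c (N : Int)) (0, 0, 0)
        = ((left : Int),
           (PySem.List.pyRange 0 (m : Int) 1).foldl (stepB S c) 0,
           ssum array t m - ssum array t left) ∧
      left ≤ m ∧ (∀ i : Nat, i < left → ssum array t i < ssum array t m - c) := by
  intro m
  induction m with
  | zero =>
    intro _
    refine ⟨0, ?_, le_refl _, by omega⟩
    rw [PySem.List.pyRange_one_eq_nil (by omega)]
    simp [ssum_zero]
  | succ m ih =>
    intro hm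
    obtain ⟨left, hfold, hleft, hbelow⟩ := ih (by omega)
    have hmono_ssum : ∀ j k : Nat, j ≤ k → k ≤ N → ssum array t j ≤ ssum array t k := by
      intro j k h1 h2
      exact ssum_mono array t h1 (fun i hi => ht ▸ cntB_mono array (by omega))
    have hsplit : PySem.List.pyRange 0 ((↑(m + 1) : Int)) 1
        = PySem.List.pyRange 0 ((m : Int)) 1 ++ [(m : Int)] := by
      have : ((↑(m + 1) : Int)) = ((m : Int)) + 1 := by push_cast; ring
      rw [this, PySem.List.pyRange_one_succ_right (by omega)]
    rw [hsplit, List.foldl_append, List.foldl_append, hfold]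
    simp only [List.foldl_cons, List.foldl_nil]
    -- A's step
    have hblast : PySem.List.pyGetD pfx (N : Int) 0 = t := by rw [hpfx N (le_refl N), ht]
    have hpairs : (if PySem.List.pyGetD array (m : Int) "" == "a"
        then (ssum array t m - ssum array t left) + (t - PySem.List.pyGetD pfx (m : Int) 0)
        else (ssum array t m - ssum array t left))
        = ssum array t (m + 1) - ssum array t left := by
      rw [PySem.List.pyGetD_natCast, hpfx m (by omega), ssum_succ, wtF]
      split <;> ring
    obtain ⟨L, heq, hLl, hLm1, hbet, hstop⟩ :=
      shrinkA_spec array pfx N hlen t c hpfx m (by omega) (m + 1) left (by omega) (by omega)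
    have hstepA : stepA array pfx c (N : Int)
        ((left : Int), (PySem.List.pyRange 0 ((m : Int)) 1).foldl (stepB S c) 0,
          ssum array t m - ssum array t left) ((m : Int))
        = ((L : Int),
           max ((PySem.List.pyRange 0 ((m : Int)) 1).foldl (stepB S c) 0) ((m : Int) - (L : Int) + 1),
           ssum array t (m + 1) - ssum array t L) := by
      simp only [stepA, hblast, hpairs, heq]
    rw [hstepA]
    -- B's step
    have hcast : ((m : Int) + 1) = ((m + 1 : Nat) : Int) := by push_cast; ring
    have htarget : PySem.List.pyGetD S ((m : Int) + 1) 0 - c = ssum array t (m + 1) - c := by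
      rw [hcast, hS (m + 1) (by omega)]
    have hmono : ∀ i j : Int, 0 ≤ i → i ≤ j → j ≤ ((m + 1 : Nat) : Int) →
        PySem.List.pyGetD S i 0 ≤ PySem.List.pyGetD S j 0 := by
      intro i j h1 h2 h3
      have hi' : ((i.toNat : Nat) : Int) = i := Int.toNat_of_nonneg h1
      have hj' : ((j.toNat : Nat) : Int) = j := Int.toNat_of_nonneg (by omega)
      rw [← hi', ← hj', hS i.toNat (by omega), hS j.toNat (by omega)]
      exact hmono_ssum i.toNat j.toNat (by omega) (by omega)
    obtain ⟨hx0, hxb, hxbelow, hxstop⟩ :=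
      bsearchB_spec S (ssum array t (m + 1) - c) ((m + 1 : Nat) : Int) hmono
        (m + 1) 0 ((m : Int) + 1) (by omega) (le_refl 0) (by omega) (by omega)
        (by omega) (by omega)
    set x := bsearchB S (ssum array t (m + 1) - c) 0 ((m : Int) + 1) with hxdef
    have hLbelow : ∀ i : Nat, i < L → ssum array t i < ssum array t (m + 1) - c := by
      intro i hi
      rcases Nat.lt_or_ge i left with h | h
      · have h1 := hbelow i h
        have h2 := hmono_ssum m (m + 1) (by omega) (by omega)
        omega
      · exact hbet i h hi
    have hLx : (L : Int) = x := by
      have hXm : x.toNat ≤ m + 1 := by omega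
      have hx' : ((x.toNat : Nat) : Int) = x := Int.toNat_of_nonneg hx0
      have hXeq : L = x.toNat := by
        refine stop_unique (ssum array t) (ssum array t (m + 1) - c) (m + 1) L x.toNat
          hLm1 hLbelow hstop hXm ?_ ?_
        · intro i hi
          have := hxbelow (i : Int) (by omega) (by omega)
          rw [hS i (by omega)] at this
          exact this
        · intro hXlt
          have := hxstop (by omega)
          rw [← hx', hS x.toNat (by omega)] at this
          exact this
      rw [hXeq, hx']
    have hBstep : stepB S c ((PySem.List.pyRange 0 ((m : Int)) 1).foldl (stepB S c) 0) ((m : Int))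
        = max ((PySem.List.pyRange 0 ((m : Int)) 1).foldl (stepB S c) 0) ((m : Int) + 1 - x) := by
      simp only [stepB, htarget, hxdef]
    rw [hBstep]
    refine ⟨L, ?_, by omega, hLbelow⟩
    have harith : ((m : Int) - (L : Int) + 1) = ((m : Int) + 1 - x) := by rw [← hLx]; ring
    rw [harith]

-- ===== VERDICT (by name: the statement is the Claim_ definition above) =====
theorem func_spec : Claim_equal_func := by
  intro n c array hdom hpre
  have hpre' : n ≤ (array.length : Int) := hpre
  unfold Spec_func
  by_cases hn : n ≤ 0
  · simp only [func, func_alt]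
    rw [PySem.List.pyRange_one_eq_nil hn]
    simp
  · rw [not_le] at hn
    set N := n.toNat with hNdef
    have hn' : ((N : Nat) : Int) = n := Int.toNat_of_nonneg (by omega)
    have hlenN : N ≤ array.length := by omega
    have e1 : (n + 1).toNat = N + 1 := by omega
    obtain ⟨hplen, hpcnt, hpget⟩ := pfxA_char array N hlenN N (le_refl N)
    simp only [func, func_alt]
    rw [e1, ← hn']
    set pfxL := ((PySem.List.pyRange 1 ((N : Int) + 1) 1).foldl (stepPfxA array)
        (List.replicate (N + 1) 0, 0)).1 with hpfxL
    set t := ((PySem.List.pyRange 1 ((N : Int) + 1) 1).foldl (stepPfxA array)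
        (List.replicate (N + 1) 0, 0)).2 with htdef
    have ht : t = cntB array N := hpcnt
    have hpfx : ∀ k : Nat, k ≤ N → PySem.List.pyGetD pfxL (k : Int) 0 = cntB array k := by
      intro k hk
      rw [hpget k hk, if_pos hk]
    obtain ⟨hSlen, hSget⟩ := SB_char array pfxL N hlenN t hpfx N (le_refl N)
    set SL := (PySem.List.pyRange 0 ((N : Int)) 1).foldl (stepSB array pfxL t)
        (List.replicate (N + 1) 0) with hSL
    have hS : ∀ k : Nat, k ≤ N → PySem.List.pyGetD SL (k : Int) 0 = ssum array t k := by
      intro k hk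
      rw [hSget k hk, if_pos hk]
    obtain ⟨left, hfold, _, _⟩ :=
      main_inv array pfxL SL N c hlenN t ht hpfx hS N (le_refl N)
    rw [hfold]
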